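-- pv_equiv track=rewrite | github.com/KamelNOOR/024_Cypto_Vigenere | cryptanalyse_vigenere.py | clef_par_decalages
-- ===== SOURCE A (Python) =====
-- def freq(txt):
-- 	"""
-- 	String -> list[int]
-- 	"""
-- 	#init
-- 	hist=[0]*26
-- 	#loop occ
-- 	for c in txt:
-- 		hist[((ord(c))-65)] += 1
-- 	return hist
--
-- def lettre_freq_max(txt):
-- 	"""
-- 	String -> int
-- 	"""
-- 	histOcc = freq(txt)
-- 	occMax = -1
-- 	indexMax = -1
-- 	for index in range(len(histOcc)):
-- 		if (histOcc[index] > occMax):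
-- 			occMax = histOcc[index]
-- 			indexMax = index
-- 	return indexMax
--
-- def clef_par_decalages(cipher, key_length):
-- 	"""
-- 	string * int --> tab[int]
-- 	"""
-- 	decalages=[0]*key_length
-- 	for i in range(key_length):
-- 		s = ""
-- 		for j in range(i,len(cipher),key_length):
-- 			s += cipher[j]
-- 		imax = lettre_freq_max(s)
-- 		decalages[i] = (imax - ord("E") + 65) % 26
-- 	return decalages
-- ===== SOURCE B (Python) =====
-- def clef_par_decalages(cipher, key_length):
--     """
--     string * int --> tab[int]
--     Single forward pass filling a key_length x 26 histogram table, then an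
--     argmax per row (strict '>', seed -1, so the lowest index wins ties).
--     """
--     if key_length <= 0:
--         return []
--     hist = [[0] * 26 for _ in range(key_length)]
--     for j, c in enumerate(cipher):
--         hist[j % key_length][(ord(c) - 65) % 26] += 1
--     out = []
--     for row in hist:
--         occ_max, arg = -1, -1
--         for idx in range(26):
--             if row[idx] > occ_max:
--                 occ_max, arg = row[idx], idx
--         out.append((arg - 4) % 26)
--     return out
-- ===== Notes on version B (the rewrite author's own statement) =====
-- stated objective: simpler
-- what changed: B replaces A's per-column substring extraction (one stride-k rebuild of a string plus a fresh 26-bin frequency pass for each key position) by one single forward pass over the cipher that fills a key_length x 26 histogram table, followed by an argmax per row; the tie-break (strict >, seed -1) and the (idx-4) % 26 shift are kept.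
import Mathlib
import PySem

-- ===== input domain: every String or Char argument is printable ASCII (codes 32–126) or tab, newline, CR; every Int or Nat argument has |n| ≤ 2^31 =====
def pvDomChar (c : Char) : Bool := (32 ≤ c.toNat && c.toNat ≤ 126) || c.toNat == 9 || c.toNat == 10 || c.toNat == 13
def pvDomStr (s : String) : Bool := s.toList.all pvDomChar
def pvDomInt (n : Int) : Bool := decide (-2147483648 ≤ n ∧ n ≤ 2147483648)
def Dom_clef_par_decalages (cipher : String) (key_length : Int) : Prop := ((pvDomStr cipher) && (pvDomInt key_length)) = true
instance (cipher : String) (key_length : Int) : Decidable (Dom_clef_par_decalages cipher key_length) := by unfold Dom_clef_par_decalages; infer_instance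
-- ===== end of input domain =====

-- B replaces A's per-column substring extraction + per-column frequency pass by ONE forward
-- pass filling a key_length × 26 histogram table, then an argmax per row (objective: simpler).

-- ===== PORT A =====
-- hist[ord(c)-65] += 1 : pyGet?/pySet? model Python's (possibly negative) list indexing; none = IndexError
def pvFreqA (txt : List Char) : Option (List Int) :=
  txt.foldl
    (fun acc c => acc.bind (fun hist =>
      match PySem.List.pyGet? hist ((c.toNat : Int) - 65) with
      | none => none
      | some v => PySem.List.pySet? hist ((c.toNat : Int) - 65) (v + 1)))
    (some (List.replicate 26 0))

def pvLettreFreqMaxA (txt : List Char) : Option Int :=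
  (pvFreqA txt).map (fun histOcc =>
    ((List.range histOcc.length).foldl
      (fun (st : Int × Int) (index : Nat) =>
        if histOcc.getD index 0 > st.1 then (histOcc.getD index 0, (index : Int)) else st)
      (-1, -1)).2)

def clef_par_decalages (cipher : String) (key_length : Int) : List Int :=
  let cs := cipher.toList
  ((PySem.List.pyRange 0 key_length 1).foldl
    (fun acc i => acc.bind (fun dec =>
      -- s built by s += cipher[j] over range(i, len(cipher), key_length); index j is in range
      let s : List Char := (PySem.List.pyRange i (cs.length : Int) key_length).foldl
        (fun s j => s ++ [cs.getD j.toNat 'A']) []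
      (pvLettreFreqMaxA s).map (fun imax =>
        dec.set i.toNat (PySem.Int.mod (imax - 69 + 65) 26))))
    (some (List.replicate key_length.toNat 0))).getD []

-- ===== PORT B =====
def clef_par_decalages_alt (cipher : String) (key_length : Int) : List Int :=
  if key_length ≤ 0 then []
  else
    let hist := (PySem.List.enumerate cipher.toList 0).foldl
      (fun (h : List (List Int)) (p : Int × Char) =>
        let r := (PySem.Int.mod p.1 key_length).toNat
        h.set r ((h.getD r []).set ((PySem.Int.mod ((p.2.toNat : Int) - 65) 26).toNat)
          ((h.getD r []).getD ((PySem.Int.mod ((p.2.toNat : Int) - 65) 26).toNat) 0 + 1)))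
      (List.replicate key_length.toNat (List.replicate 26 (0 : Int)))
    hist.map (fun row =>
      PySem.Int.mod
        (((List.range 26).foldl
          (fun (st : Int × Int) (idx : Nat) =>
            if row.getD idx 0 > st.1 then (row.getD idx 0, (idx : Int)) else st)
          (-1, -1)).2 - 4) 26)

-- ===== PRECONDITION & SPEC =====
-- Pre_ excludes exactly the inputs on which A raises IndexError: a positive key_length
-- together with some cipher character of code < 39 or > 90 (hist index ord(c)-65 out of range).
def Pre_clef_par_decalages (cipher : String) (key_length : Int) : Prop :=
  (decide (key_length ≤ 0) || cipher.toList.all (fun c => decide (39 ≤ c.toNat ∧ c.toNat ≤ 90))) = true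
instance (cipher : String) (key_length : Int) : Decidable (Pre_clef_par_decalages cipher key_length) := by
  unfold Pre_clef_par_decalages; infer_instance
def pvWitness_clef_par_decalages : String × Int := ("CAESAR", 2)

def Spec_clef_par_decalages (cipher : String) (key_length : Int) (out : List Int) : Prop := out = clef_par_decalages_alt cipher key_length
instance (cipher : String) (key_length : Int) (out : List Int) : Decidable (Spec_clef_par_decalages cipher key_length out) := by unfold Spec_clef_par_decalages; infer_instance

-- ===== CLAIM (what is proved, stated in full; the proofs are below) =====
def Claim_equal_clef_par_decalages : Prop := ∀ (cipher : String) (key_length : Int), Dom_clef_par_decalages cipher key_length → Pre_clef_par_decalages cipher key_length → Spec_clef_par_decalages cipher key_length (clef_par_decalages cipher key_length)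

-- ===== LEMMAS AND PROOFS =====

-- the 26-bucket a character lands in (A's wrapped index hist[ord(c)-65] and B's (ord(c)-65) % 26)
def pvBucket (c : Char) : Nat := (((c.toNat : Int) - 65) % 26).toNat
def pvRowStep (r : List Int) (c : Char) : List Int := r.set (pvBucket c) (r.getD (pvBucket c) 0 + 1)
def pvCol (cs : List Char) (k i : Nat) : List Char :=
  ((List.range cs.length).filter (fun j => decide (j % k = i))).map (fun j => cs.getD j 'A')
def pvArgmax (row : List Int) : Int :=
  ((List.range 26).foldl
    (fun (st : Int × Int) (idx : Nat) =>
      if row.getD idx 0 > st.1 then (row.getD idx 0, (idx : Int)) else st) (-1, -1)).2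
def pvVal (cs : List Char) (k i : Nat) : Int :=
  PySem.Int.mod (pvArgmax ((pvCol cs k i).foldl pvRowStep (List.replicate 26 0)) - 4) 26
def pvStepB (k : Int) (h : List (List Int)) (p : Int × Char) : List (List Int) :=
  let r := (PySem.Int.mod p.1 k).toNat
  h.set r ((h.getD r []).set ((PySem.Int.mod ((p.2.toNat : Int) - 65) 26).toNat)
    ((h.getD r []).getD ((PySem.Int.mod ((p.2.toNat : Int) - 65) 26).toNat) 0 + 1))

theorem pvSortedExt (l1 l2 : List Int) (h1 : l1.Pairwise (·<·)) (h2 : l2.Pairwise (·<·))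
    (h : ∀ x, x ∈ l1 ↔ x ∈ l2) : l1 = l2 := by
  refine List.Perm.eq_of_pairwise (fun a b _ _ hab hba => absurd hba (by omega)) h1 h2 ?_
  exact List.perm_of_nodup_nodup_toFinset_eq
    (h1.imp (fun h => ne_of_lt h)) (h2.imp (fun h => ne_of_lt h)) (by ext x; simp [h x])

theorem pvRange_filter (i k n : Nat) (hik : i < k) :
    PySem.List.pyRange (i : Int) (n : Int) (k : Int)
      = ((List.range n).filter (fun j => decide (j % k = i))).map (fun (j : Nat) => (j : Int)) := by
  have hk0 : (0:Int) < (k:Int) := by exact_mod_cast Nat.pos_of_ne_zero (by omega)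
  apply pvSortedExt
  · rw [PySem.List.pyRange_of_pos (i:Int) (n:Int) hk0]
    refine List.Pairwise.map _ (fun a b hab => ?_) (List.pairwise_lt_range)
    have : (a:Int) < b := by exact_mod_cast hab
    nlinarith
  · refine List.Pairwise.map _ (fun a b hab => by exact_mod_cast hab) ?_
    exact List.Pairwise.filter _ (List.pairwise_lt_range)
  · intro x
    rw [PySem.List.mem_pyRange_iff_of_pos hk0]
    simp only [List.mem_map, List.mem_filter, List.mem_range, decide_eq_true_eq]
    constructor
    · rintro ⟨hle, hlt, q, hq⟩
      have hxi : (0:Int) ≤ x - i := by omega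
      have hqn : (0:Int) ≤ q := by nlinarith
      have hcast : (x.toNat : Int) = ((q.toNat * k + i : Nat) : Int) := by
        push_cast
        rw [Int.toNat_of_nonneg (by omega), Int.toNat_of_nonneg hqn]
        linarith
      have hx : x.toNat = q.toNat * k + i := by exact_mod_cast hcast
      refine ⟨x.toNat, ⟨by omega, by simp [hx, Nat.mod_eq_of_lt hik]⟩, by omega⟩
    · rintro ⟨j, ⟨hj, hmod⟩, rfl⟩
      obtain ⟨q, hq⟩ : ∃ q, j = q * k + i :=
        ⟨j / k, by conv_lhs => rw [← Nat.div_add_mod j k, hmod, Nat.mul_comm]⟩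
      refine ⟨by omega, by omega, (q:Int), ?_⟩
      push_cast [hq]; ring

theorem pvIdx26 (o : Nat) (h1 : 39 ≤ o) (h2 : o ≤ 90) :
    PySem.List.pyIdx? 26 ((o : Int) - 65) = some (((o : Int) - 65) % 26).toNat := by
  simp only [PySem.List.pyIdx?]
  split_ifs with ha hb hc <;> [skip; omega; skip; omega] <;> congr 1 <;> omega

theorem pvRow_length (l : List Char) (r : List Int) :
    (l.foldl pvRowStep r).length = r.length := by
  induction l generalizing r with
  | nil => rfl
  | cons c l ih => simp [List.foldl_cons, ih, pvRowStep]

theorem pvFreqA_gen (l : List Char) (h : ∀ c ∈ l, 39 ≤ c.toNat ∧ c.toNat ≤ 90) :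
    ∀ hist : List Int, hist.length = 26 →
      (l.foldl
        (fun acc c => acc.bind (fun hist =>
          match PySem.List.pyGet? hist ((c.toNat : Int) - 65) with
          | none => none
          | some v => PySem.List.pySet? hist ((c.toNat : Int) - 65) (v + 1)))
        (some hist))
      = some (l.foldl pvRowStep hist) := by
  induction l with
  | nil => intro hist _; rfl
  | cons c l ih =>
    intro hist hlen
    obtain ⟨hc1, hc2⟩ := h c (by simp)
    have hb : pvBucket c < 26 := by unfold pvBucket; omega
    have hg : PySem.List.pyGet? hist ((c.toNat : Int) - 65) = some (hist.getD (pvBucket c) 0) := by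
      simp only [PySem.List.pyGet?, hlen ▸ pvIdx26 c.toNat hc1 hc2, Option.bind_some]
      rw [List.getElem?_eq_getElem (by omega), List.getD_eq_getElem?_getD,
        List.getElem?_eq_getElem (by omega)]
      rfl
    have hs : PySem.List.pySet? hist ((c.toNat : Int) - 65) (hist.getD (pvBucket c) 0 + 1)
        = some (pvRowStep hist c) := by
      simp only [PySem.List.pySet?, hlen ▸ pvIdx26 c.toNat hc1 hc2]
      rfl
    simp only [List.foldl_cons, Option.bind_some, hg, hs]
    exact ih (fun c hc => h c (by simp [hc])) _ (by simp [pvRowStep, hlen])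

theorem pvFreqA_eq (l : List Char) (h : ∀ c ∈ l, 39 ≤ c.toNat ∧ c.toNat ≤ 90) :
    pvFreqA l = some (l.foldl pvRowStep (List.replicate 26 0)) :=
  pvFreqA_gen l h (List.replicate 26 0) (by simp)

theorem pvLettre_eq (l : List Char) (h : ∀ c ∈ l, 39 ≤ c.toNat ∧ c.toNat ≤ 90) :
    pvLettreFreqMaxA l = some (pvArgmax (l.foldl pvRowStep (List.replicate 26 0))) := by
  unfold pvLettreFreqMaxA
  rw [pvFreqA_eq l h]
  simp only [Option.map_some, Option.some.injEq]
  rw [show (l.foldl pvRowStep (List.replicate 26 0)).length = 26 by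
    rw [pvRow_length]; simp]
  rfl

theorem pvStepB_nat (k : Nat) (h : List (List Int)) (j : Nat) (c : Char) :
    pvStepB (k : Int) h ((j : Int), c) = h.set (j % k) (pvRowStep (h.getD (j % k) []) c) := by
  simp only [pvStepB, pvRowStep, pvBucket, PySem.Int.mod_natCast, Int.toNat_natCast,
    PySem.Int.mod_eq_emod_of_pos (by omega : (0:Int) < 26)]

theorem pvFoldB_len (k : Int) (l : List (Int × Char)) :
    ∀ h : List (List Int), (l.foldl (pvStepB k) h).length = h.length := by
  induction l with
  | nil => intro h; rfl
  | cons p l ih => intro h; rw [List.foldl_cons, ih]; simp [pvStepB]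

theorem pvTableGen (k : Nat) (cs : List Char) (js : List Nat) :
    ∀ (h : List (List Int)), h.length = k → ∀ i, i < k →
      ((js.map (fun (j : Nat) => ((j : Int), cs.getD j 'A'))).foldl (pvStepB (k : Int)) h).getD i []
        = ((js.filter (fun j => decide (j % k = i))).map (fun j => cs.getD j 'A')).foldl
            pvRowStep (h.getD i []) := by
  induction js with
  | nil => intro h _ i _; rfl
  | cons j js ih =>
    intro h hlen i hik
    simp only [List.map_cons, List.foldl_cons, List.filter_cons, pvStepB_nat]
    by_cases hji : j % k = i
    · simp only [hji, decide_true, if_true, List.map_cons, List.foldl_cons]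
      rw [ih _ (by simp [hlen]) i hik]
      congr 1
      rw [List.getD_eq_getElem?_getD, List.getElem?_set_self (by omega), List.getD_eq_getElem?_getD]
      simp
    · simp only [hji, decide_false]
      rw [ih _ (by simp [hlen]) i hik]
      congr 1
      rw [List.getD_eq_getElem?_getD, List.getElem?_set_ne (by omega), List.getD_eq_getElem?_getD]

theorem pvTable (cs : List Char) (k : Nat) (_hk : 0 < k) :
    (PySem.List.enumerate cs 0).foldl (pvStepB (k : Int))
        (List.replicate k (List.replicate 26 (0 : Int)))
      = (List.range k).map (fun i => (pvCol cs k i).foldl pvRowStep (List.replicate 26 0)) := by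
  rw [PySem.List.enumerate_eq_map_pyRange cs 'A']
  rw [show PySem.List.len cs = ((cs.length : Nat) : Int) from PySem.List.len_eq cs]
  rw [PySem.List.pyRange_zero_nat, List.map_map]
  rw [show ((fun j => (j, PySem.List.pyGetD cs j 'A')) ∘ fun (kk : Nat) => (kk : Int))
      = (fun (j : Nat) => ((j : Int), cs.getD j 'A')) from funext (fun j => by
        simp [Function.comp, PySem.List.pyGetD_natCast])]
  apply List.ext_getElem
  · rw [pvFoldB_len]; simp
  · intro i hi1 hi2
    have hik : i < k := by simpa using hi2
    have h1 : ∀ (L : List (List Int)) (hh : i < L.length), L[i] = L.getD i [] := by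
      intro L hh
      rw [List.getD_eq_getElem?_getD, List.getElem?_eq_getElem hh]; rfl
    rw [h1 _ hi1, h1 _ hi2]
    rw [pvTableGen k cs (List.range cs.length) _ (by simp) i hik]
    have : (List.replicate k (List.replicate 26 (0:Int))).getD i [] = List.replicate 26 0 := by
      rw [List.getD_eq_getElem?_getD, List.getElem?_replicate_of_lt hik]; rfl
    rw [this]
    rw [List.getD_eq_getElem?_getD, List.getElem?_map, List.getElem?_range hik]
    rfl

theorem pvSetFold (f : Nat → Int) : ∀ (m : Nat) (d : List Int), m ≤ d.length →
    (List.range m).foldl (fun dec j => dec.set j (f j)) d = (List.range m).map f ++ d.drop m := by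
  intro m
  induction m with
  | zero => simp
  | succ m ih =>
    intro d hm
    rw [List.range_succ, List.foldl_append, ih d (by omega)]
    simp only [List.foldl_cons, List.foldl_nil, List.map_append, List.map_cons, List.map_nil]
    rw [List.drop_eq_getElem_cons (by omega)]
    rw [List.set_append_right _ _ (by simp)]
    simp only [List.length_map, List.length_range, Nat.sub_self]
    rw [List.set_cons_zero]
    simp [List.append_assoc]

theorem pvOptFold {α : Type} (f : List Int → α → List Int) (L : List α) :
    ∀ d, (L.foldl (fun acc x => acc.bind (fun b => some (f b x))) (some d)) = some (L.foldl f d) := by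
  induction L with
  | nil => intro d; rfl
  | cons x L ih => intro d; simp only [List.foldl_cons, Option.bind_some]; exact ih _

theorem pvCol_chars (cs : List Char) (k i : Nat)
    (h : ∀ c ∈ cs, 39 ≤ c.toNat ∧ c.toNat ≤ 90) :
    ∀ c ∈ pvCol cs k i, 39 ≤ c.toNat ∧ c.toNat ≤ 90 := by
  intro c hc
  simp only [pvCol, List.mem_map, List.mem_filter, List.mem_range] at hc
  obtain ⟨j, ⟨hj, _⟩, rfl⟩ := hc
  exact h _ (by rw [List.getD_eq_getElem?_getD, List.getElem?_eq_getElem hj]; exact List.getElem_mem hj)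

theorem pvA_eq (cs : List Char) (k : Nat) (_hk : 0 < k)
    (h : ∀ c ∈ cs, 39 ≤ c.toNat ∧ c.toNat ≤ 90) :
    ((PySem.List.pyRange 0 (k : Int) 1).foldl
      (fun acc i => acc.bind (fun dec =>
        let s : List Char := (PySem.List.pyRange i (cs.length : Int) (k : Int)).foldl
          (fun s j => s ++ [cs.getD j.toNat 'A']) []
        (pvLettreFreqMaxA s).map (fun imax =>
          dec.set i.toNat (PySem.Int.mod (imax - 69 + 65) 26))))
      (some (List.replicate k 0))).getD []
    = (List.range k).map (fun i => pvVal cs k i) := by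
  have hcong : ∀ (acc : Option (List Int)) (i : Int), i ∈ PySem.List.pyRange 0 (k : Int) 1 →
      (fun acc i => acc.bind (fun dec =>
        let s : List Char := (PySem.List.pyRange i (cs.length : Int) (k : Int)).foldl
          (fun s j => s ++ [cs.getD j.toNat 'A']) []
        (pvLettreFreqMaxA s).map (fun imax =>
          dec.set i.toNat (PySem.Int.mod (imax - 69 + 65) 26)))) acc i
      = acc.bind (fun dec => some (dec.set i.toNat (pvVal cs k i.toNat))) := by
    intro acc i hi
    rw [PySem.List.mem_pyRange_one] at hi
    have hi0 : 0 ≤ i := hi.1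
    have hik : i.toNat < k := by omega
    have hs : (PySem.List.pyRange i (cs.length : Int) (k : Int)).foldl
        (fun s j => s ++ [cs.getD j.toNat 'A']) ([] : List Char) = pvCol cs k i.toNat := by
      rw [PySem.List.foldl_append_singleton_eq_map]
      rw [show i = ((i.toNat : Nat) : Int) from (Int.toNat_of_nonneg hi0).symm]
      rw [pvRange_filter i.toNat k cs.length hik, List.map_map]
      simp only [List.nil_append, pvCol]
      rfl
    simp only [hs]
    congr 1
    funext dec
    rw [pvLettre_eq _ (pvCol_chars cs k i.toNat h)]
    have harith : ∀ x : Int, x - 69 + 65 = x - 4 := fun x => by ring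
    simp only [Option.map_some, pvVal, harith]
  rw [PySem.List.foldl_congr_mem (PySem.List.pyRange 0 (k : Int) 1) _ _
    (some (List.replicate k 0)) hcong]
  rw [PySem.List.pyRange_zero_nat, List.foldl_map]
  have : (fun (acc : Option (List Int)) (j : Nat) =>
      acc.bind (fun dec => some (dec.set ((j : Int)).toNat (pvVal cs k ((j : Int)).toNat))))
      = (fun acc (j : Nat) => acc.bind (fun dec => some (dec.set j (pvVal cs k j)))) := by
    funext acc j; simp
  rw [this, pvOptFold (fun dec j => dec.set j (pvVal cs k j)) (List.range k)]
  rw [pvSetFold (pvVal cs k) k (List.replicate k 0) (by simp)]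
  simp

-- ===== VERDICT (by name: the statement is the Claim_ definition above) =====
theorem clef_par_decalages_spec : Claim_equal_clef_par_decalages := by
  unfold Claim_equal_clef_par_decalages
  intro cipher key_length _ hpre
  unfold Spec_clef_par_decalages
  unfold Pre_clef_par_decalages at hpre
  simp only [Bool.or_eq_true, decide_eq_true_eq, List.all_eq_true] at hpre
  by_cases hk : key_length ≤ 0
  · simp only [clef_par_decalages, clef_par_decalages_alt, if_pos hk]
    rw [PySem.List.pyRange_one_eq_nil hk]
    simp [Int.toNat_of_nonpos hk]
  · have hpos : 0 < key_length := by omega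
    have hchars : ∀ c ∈ cipher.toList, 39 ≤ c.toNat ∧ c.toNat ≤ 90 := by
      rcases hpre with h | h
      · omega
      · intro c hc; simpa using h c hc
    set k : Nat := key_length.toNat with hkdef
    have hkk : key_length = (k : Int) := by omega
    have hk0 : 0 < k := by omega
    simp only [clef_par_decalages, clef_par_decalages_alt, hkk]
    rw [show (fun (h : List (List Int)) (p : Int × Char) =>
        let r := (PySem.Int.mod p.1 (k : Int)).toNat
        h.set r ((h.getD r []).set ((PySem.Int.mod ((p.2.toNat : Int) - 65) 26).toNat)
          ((h.getD r []).getD ((PySem.Int.mod ((p.2.toNat : Int) - 65) 26).toNat) 0 + 1)))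
      = pvStepB (k : Int) from rfl]
    rw [show ((k : Int)).toNat = k by omega]
    rw [if_neg (show ¬((k : Int) ≤ 0) by omega)]
    rw [pvTable cipher.toList k hk0, pvA_eq cipher.toList k hk0 hchars, List.map_map]
    rfl
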